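-- pv_equiv track=rewrite | github.com/Apich238/mySAT | generator.py | CNFt_open_branches
-- ===== SOURCE A (Python) =====
-- import math
--
-- def CNFt_open_branches(f):
--     def extend_liters(a, ls):
--         nl = ls  # .copy()
--
--         if -a in nl:
--             return None
--         elif a in nl:
--             return nl
--         else:
--             return nl + (a,)
--
--     def optimize_set(s0):
--         if len(s0) < 2:
--             return s0
--         s = list(s0)
--         s.sort(key=lambda l: len(l))
--         i = 0
--         while i < len(s):
--             a = s[i]
--             j = i + 1
--             while j < len(s):
--                 b = s[j]
--                 if is_strong_subset(a, b):
--                     s.pop(j)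
--                 else:
--                     j += 1
--             i += 1
--         return set(s)
--
--     def atree_rec(branch, liters=()):
--         if len(branch) == 0:
--             return {tuple(sorted(liters, key=math.fabs))}
--         else:
--             res = set()
--             b = branch.copy()
--             dis = b.pop(0)
--             for v in dis:
--                 nl = extend_liters(v, liters)
--                 if nl is None:
--                     continue
--                 rb = sorted([tuple([m for m in x if m != -v]) for x in b if v not in x], key=len)
--                 r = atree_rec(rb, nl)
--                 if r is not None and len(r) > 0:
--                     res.update(r)
--                     # res.extend(r)
--             # if len(res) > 5:
--             #     res = optimize_set(res)
--             return res
--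
--     open_branches = atree_rec(f)
--     return optimize_set(open_branches)
--
-- def is_strong_subset(a, b):
--     # a<b
--     if len(a) >= len(b):
--         return False
--     for am in a:
--         if not am in b:
--             return False
--     return True
-- ===== SOURCE B (Python) =====
-- def CNFt_open_branches(f):
--     # iterative DFS with an explicit stack instead of recursion, then a single
--     # left-to-right minimisation pass over the size-sorted deduplicated leaves
--     stack = [(list(f), ())]
--     leaves = []
--     while stack:
--         clauses, lits = stack.pop()
--         if not clauses:
--             leaves.append(tuple(sorted(lits, key=abs)))
--             continue
--         first, rest = clauses[0], clauses[1:]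
--         for v in reversed(first):
--             if -v in lits:
--                 continue
--             nl = lits if v in lits else lits + (v,)
--             rb = sorted([tuple(m for m in x if m != -v) for x in rest if v not in x], key=len)
--             stack.append((rb, nl))
--     ordered = list(dict.fromkeys(leaves))
--     ordered.sort(key=len)
--     accepted = []
--     for b in ordered:
--         if not any(set(a) < set(b) for a in accepted):
--             accepted.append(b)
--     return set(accepted)
-- ===== Notes on version B (the rewrite author's own statement) =====
-- stated objective: alternative
-- what changed: B replaces A's recursive tree walk by an iterative explicit-stack DFS loop collecting leaves into a flat list, and replaces A's destructive sort-and-pop subsumption sweep (nested while loops with list.pop) by a single left-to-right pass over the size-sorted deduplicated leaves that keeps a branch only if no already-accepted branch is a strict subset of it (set(a) < set(b)).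
import Mathlib
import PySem

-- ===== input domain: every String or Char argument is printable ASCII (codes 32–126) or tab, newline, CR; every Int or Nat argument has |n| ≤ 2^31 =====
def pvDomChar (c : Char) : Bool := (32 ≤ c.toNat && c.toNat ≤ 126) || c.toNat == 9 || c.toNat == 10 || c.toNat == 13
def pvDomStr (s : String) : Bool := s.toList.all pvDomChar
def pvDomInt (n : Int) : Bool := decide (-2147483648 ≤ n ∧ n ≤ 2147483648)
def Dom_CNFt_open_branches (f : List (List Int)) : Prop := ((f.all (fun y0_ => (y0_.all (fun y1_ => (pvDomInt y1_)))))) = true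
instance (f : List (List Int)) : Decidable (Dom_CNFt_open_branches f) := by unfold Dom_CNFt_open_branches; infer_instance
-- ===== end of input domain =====

-- B replaces A's recursive tree walk by an iterative explicit-stack DFS loop collecting leaves
-- into a flat list, and replaces A's destructive sort-and-pop subsumption sweep by a single
-- left-to-right pass over the size-sorted deduplicated leaves keeping a branch only if no
-- already-accepted branch is a strict subset of it (objective: alternative). The returned value
-- is a Python set, so only its members matter to Python; the fuel arguments below are totality
-- guards only and are never exhausted (fuel = branch length, resp. the product bound pvNu,
-- always suffices).

-- ===== PORT A =====
def pvIsStrongSubset (a b : List Int) : Bool :=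
  if b.length ≤ a.length then false
  else a.all (fun am => b.contains am)

def pvExtendLiters (a : Int) (ls : List Int) : Option (List Int) :=
  if ls.contains (-a) then none
  else if ls.contains a then some ls
  else some (ls ++ [a])

def pvAtreeRec (fuel : Nat) (branch : List (List Int)) (liters : List Int) : List (List Int) :=
  match branch with
  | [] => PySem.Set.ofList [PySem.List.sorted liters (fun l => l.natAbs) false]
  | dis :: b =>
    match fuel with
    | 0 => []  -- never reached: fuel ≥ branch.length at every call
    | fuel + 1 =>
      dis.foldl (fun res v =>
        match pvExtendLiters v liters with
        | none => res
        | some nl =>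
          let rb := PySem.List.sorted ((b.filter (fun x => !x.contains v)).map
                      (fun x => x.filter (fun m => m != -v))) (fun x => x.length) false
          let r := pvAtreeRec fuel rb nl
          if 0 < r.length then PySem.Set.update res r else res) PySem.Set.empty

def pvOptInner (a : List Int) : List (List Int) → List (List Int)
  | [] => []
  | bb :: rest => if pvIsStrongSubset a bb then pvOptInner a rest else bb :: pvOptInner a rest

def pvOptOuter (fuel : Nat) (s : List (List Int)) : List (List Int) :=
  match s with
  | [] => []
  | a :: rest =>
    match fuel with
    | 0 => s  -- never reached: fuel ≥ s.length at every call
    | fuel + 1 => a :: pvOptOuter fuel (pvOptInner a rest)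

def CNFt_open_branches (f : List (List Int)) : List (List Int) :=
  let ob := pvAtreeRec f.length f []
  if ob.length < 2 then ob
  else
    let s := PySem.List.sorted ob (fun l => l.length) false
    PySem.Set.ofList (pvOptOuter s.length s)

-- ===== PORT B =====
-- fuel bound for the while loop: the number of loop iterations is at most pvNu f
def pvNu (cs : List (List Int)) : Nat := (cs.map (fun c => c.length + 1)).prod

-- set(a) < set(b) (proper subset of Python sets)
def pvSetLt (a b : List Int) : Bool :=
  PySem.Set.issubset (PySem.Set.ofList a) (PySem.Set.ofList b) &&
    !(PySem.Set.equal (PySem.Set.ofList a) (PySem.Set.ofList b))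

-- the 'while stack:' loop; the Lean stack list has its head at Python's list end (the top)
def pvRunB (fuel : Nat) (stack : List (List (List Int) × List Int)) (leaves : List (List Int)) : List (List Int) :=
  match fuel with
  | 0 => leaves  -- never reached: pvNu f bounds the number of iterations
  | fuel + 1 =>
    match stack with
    | [] => leaves
    | (clauses, lits) :: rest =>
      match clauses with
      | [] => pvRunB fuel rest (leaves ++ [PySem.List.sorted lits (fun l => l.natAbs) false])
      | first :: restc =>
        pvRunB fuel ((first.reverse).foldl (fun st v =>
            if lits.contains (-v) then st
            else
              let nl := if lits.contains v then lits else lits ++ [v]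
              let rb := PySem.List.sorted ((restc.filter (fun x => !x.contains v)).map
                          (fun x => x.filter (fun m => m != -v))) (fun x => x.length) false
              (rb, nl) :: st) rest) leaves

def CNFt_open_branches_alt (f : List (List Int)) : List (List Int) :=
  let leaves := pvRunB (pvNu f) [(f, [])] []
  let ordered := PySem.List.sorted (PySem.List.dedup leaves) (fun l => l.length) false
  let accepted := ordered.foldl (fun acc b =>
      if acc.any (fun a => pvSetLt a b) then acc else acc ++ [b]) ([] : List (List Int))
  PySem.Set.ofList accepted

-- ===== PRECONDITION & SPEC =====
def Spec_CNFt_open_branches (f : List (List Int)) (out : List (List Int)) : Prop := out = CNFt_open_branches_alt f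
instance (f : List (List Int)) (out : List (List Int)) : Decidable (Spec_CNFt_open_branches f out) := by unfold Spec_CNFt_open_branches; infer_instance

-- ===== CLAIM (what is proved, stated in full; the proofs are below) =====
def Claim_equal_CNFt_open_branches : Prop := ∀ (f : List (List Int)), Dom_CNFt_open_branches f → Spec_CNFt_open_branches f (CNFt_open_branches f)

-- ===== LEMMAS AND PROOFS =====

-- proof-side helpers: the flat DFS leaf list and the length-flavoured strict-subset test
def pvSmallerSubset (a b : List Int) : Bool :=
  decide (a.length < b.length) && a.all (fun m => b.contains m)

def pvLeaves (fuel : Nat) (clauses : List (List Int)) (lits : List Int) : List (List Int) :=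
  match clauses with
  | [] => [PySem.List.sorted lits (fun l => l.natAbs) false]
  | first :: rest =>
    match fuel with
    | 0 => []
    | fuel + 1 =>
      first.foldl (fun out v =>
        if lits.contains (-v) then out
        else
          let nl := if lits.contains v then lits else lits ++ [v]
          let rb := PySem.List.sorted ((rest.filter (fun x => !x.contains v)).map
                      (fun x => x.filter (fun m => m != -v))) (fun x => x.length) false
          out ++ pvLeaves fuel rb nl) []

lemma pv_ss_eq (a b : List Int) : pvIsStrongSubset a b = pvSmallerSubset a b := by
  unfold pvIsStrongSubset pvSmallerSubset
  by_cases h : b.length ≤ a.length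
  · simp [h, Nat.not_lt_of_le h]
  · simp [h, Nat.lt_of_not_le h]

lemma pv_update_ofList (s L : List (List Int)) :
    PySem.Set.update s (PySem.Set.ofList L) = PySem.Set.update s L := by
  rw [PySem.Set.update_eq_append_filter, PySem.Set.update_eq_append_filter,
      PySem.Set.ofList_ofList]

lemma pv_optInner_eq_filter (a : List Int) (l : List (List Int)) :
    pvOptInner a l = l.filter (fun bb => !pvSmallerSubset a bb) := by
  induction l with
  | nil => rfl
  | cons x t ih =>
    by_cases h : pvIsStrongSubset a x = true
    · have h' : pvSmallerSubset a x = true := by rw [← pv_ss_eq]; exact h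
      simp [pvOptInner, h, h', ih]
    · have h' : pvSmallerSubset a x = false := by rw [← pv_ss_eq]; exact Bool.eq_false_iff.2 h
      simp [pvOptInner, h, h', ih]

lemma pv_ss_false_of_le {a b : List Int} (h : b.length ≤ a.length) :
    pvSmallerSubset a b = false := by
  unfold pvSmallerSubset
  simp [Nat.not_lt_of_le h]

lemma pv_ss_trans {a x b : List Int} (h1 : pvSmallerSubset a x = true)
    (h2 : pvSmallerSubset x b = true) : pvSmallerSubset a b = true := by
  unfold pvSmallerSubset at *
  simp only [Bool.and_eq_true, decide_eq_true_eq, List.all_eq_true] at *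
  obtain ⟨l1, m1⟩ := h1
  obtain ⟨l2, m2⟩ := h2
  refine ⟨by omega, fun y hy => ?_⟩
  have := m1 y hy
  simp only [List.contains_eq_mem, decide_eq_true_eq] at this ⊢
  have := m2 y this
  simpa using this

lemma pv_sweep : ∀ (fuel : Nat) (s : List (List Int)), s.length ≤ fuel →
    s.Pairwise (fun a b => a.length ≤ b.length) →
    pvOptOuter fuel s = s.filter (fun bb => !s.any (fun aa => pvSmallerSubset aa bb)) := by
  intro fuel
  induction fuel with
  | zero =>
    intro s hlen _
    have : s = [] := List.length_eq_zero_iff.1 (Nat.le_zero.1 hlen)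
    subst this; rfl
  | succ n ih =>
    intro s hlen hp
    cases s with
    | nil => rfl
    | cons a t =>
      rw [List.pairwise_cons] at hp
      obtain ⟨hrel, hp'⟩ := hp
      have hpredA : ((a :: t).any (fun aa => pvSmallerSubset aa a)) = false := by
        rw [List.any_eq_false]
        intro x hx
        rcases List.mem_cons.1 hx with rfl | hx'
        · simp [pv_ss_false_of_le (Nat.le_refl _)]
        · simp [pv_ss_false_of_le (hrel x hx')]
      show a :: pvOptOuter n (pvOptInner a t) = _
      rw [pv_optInner_eq_filter]
      have hlen' : (t.filter (fun bb => !pvSmallerSubset a bb)).length ≤ n := by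
        have := List.length_filter_le (fun bb => !pvSmallerSubset a bb) t
        simp at hlen; omega
      rw [ih _ hlen' (List.Pairwise.filter _ hp')]
      have hpa : (!(a :: t).any fun aa => pvSmallerSubset aa a) = true := by
        rw [hpredA]; rfl
      have hsplit : List.filter (fun bb => !(a :: t).any fun aa => pvSmallerSubset aa bb) (a :: t)
          = a :: List.filter (fun bb => !(a :: t).any fun aa => pvSmallerSubset aa bb) t :=
        List.filter_cons_of_pos hpa
      rw [hsplit]
      congr 1
      rw [List.filter_filter]
      apply List.filter_congr
      intro bb hbb
      simp only [List.any_cons]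
      by_cases h : pvSmallerSubset a bb = true
      · simp [h]
      · have h' : pvSmallerSubset a bb = false := Bool.eq_false_iff.2 h
        simp only [h', Bool.not_false, Bool.and_true, Bool.false_or]
        have hany : (List.filter (fun bb => !pvSmallerSubset a bb) t).any
            (fun aa => pvSmallerSubset aa bb) = t.any (fun aa => pvSmallerSubset aa bb) := by
          apply Bool.eq_iff_iff.2
          rw [List.any_eq_true, List.any_eq_true]
          constructor
          · rintro ⟨x, hx, hss⟩
            exact ⟨x, (List.mem_filter.1 hx).1, hss⟩
          · rintro ⟨x, hx, hss⟩
            by_cases hax : pvSmallerSubset a x = true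
            · exact absurd (pv_ss_trans hax hss) (by simp [h'])
            · exact ⟨x, List.mem_filter.2 ⟨hx, by simp [Bool.eq_false_iff.2 hax]⟩, hss⟩
        rw [hany]

lemma pv_atree_eq : ∀ (fuel : Nat) (branch : List (List Int)) (lits : List Int),
    branch.length ≤ fuel →
    pvAtreeRec fuel branch lits = PySem.Set.ofList (pvLeaves fuel branch lits) := by
  intro fuel
  induction fuel with
  | zero =>
    intro branch lits h
    have : branch = [] := List.length_eq_zero_iff.1 (Nat.le_zero.1 h)
    subst this; rfl
  | succ n ihn =>
    intro branch lits h
    cases branch with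
    | nil => rfl
    | cons dis b =>
      have hb : b.length ≤ n := by simp at h; omega
      show dis.foldl _ PySem.Set.empty = PySem.Set.ofList (dis.foldl _ [])
      have T : ∀ (vs : List Int) (out : List (List Int)),
          vs.foldl (fun res v =>
            match pvExtendLiters v lits with
            | none => res
            | some nl =>
              let rb := PySem.List.sorted ((b.filter (fun x => !x.contains v)).map
                          (fun x => x.filter (fun m => m != -v))) (fun x => x.length) false
              let r := pvAtreeRec n rb nl
              if 0 < r.length then PySem.Set.update res r else res) (PySem.Set.ofList out) =
          PySem.Set.ofList (vs.foldl (fun out v =>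
            if lits.contains (-v) then out
            else
              let nl := if lits.contains v then lits else lits ++ [v]
              let rb := PySem.List.sorted ((b.filter (fun x => !x.contains v)).map
                          (fun x => x.filter (fun m => m != -v))) (fun x => x.length) false
              out ++ pvLeaves n rb nl) out) := by
        intro vs
        induction vs with
        | nil => intro out; rfl
        | cons v vs ihv =>
          intro out
          rw [List.foldl_cons, List.foldl_cons]
          by_cases h1 : lits.contains (-v) = true
          · have hnone : pvExtendLiters v lits = none := by
              unfold pvExtendLiters; rw [if_pos h1]
            rw [hnone, if_pos h1]
            exact ihv out
          · have h1' : lits.contains (-v) = false := Bool.eq_false_iff.2 h1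
            set nl := if lits.contains v = true then lits else lits ++ [v] with hnl
            have hmatch : pvExtendLiters v lits = some nl := by
              unfold pvExtendLiters
              rw [if_neg (by simpa using h1)]
              by_cases h2 : v ∈ lits <;> simp [hnl, h2]
            rw [hmatch, if_neg (by simpa using h1)]
            simp only []
            set rb := PySem.List.sorted ((b.filter (fun x => !x.contains v)).map
                (fun x => x.filter (fun m => m != -v))) (fun x => x.length) false with hrb
            have hrblen : rb.length ≤ n := by
              have e1 := PySem.List.length_sorted
                (xs := (b.filter (fun x => !x.contains v)).map
                  (fun x => x.filter (fun m => m != -v)))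
                (key := fun x : List Int => x.length) (rev := false)
              have e2 : ((b.filter (fun x => !x.contains v)).map
                  (fun x => x.filter (fun m => m != -v))).length ≤ b.length := by
                rw [List.length_map]; exact List.length_filter_le _ _
              rw [← hrb] at e1
              omega
            rw [ihn rb nl hrblen]
            cases hL : pvLeaves n rb nl with
            | nil =>
              rw [show PySem.Set.ofList ([] : List (List Int)) = [] from rfl]
              rw [if_neg (by simp), List.append_nil]
              exact ihv out
            | cons x xs =>
              have hpos : 0 < (PySem.Set.ofList (x :: xs)).length := by
                have hmem : x ∈ PySem.Set.ofList (x :: xs) := (PySem.Set.mem_ofList _ _).2 (by simp)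
                cases hh : PySem.Set.ofList (x :: xs) with
                | nil => rw [hh] at hmem; simp at hmem
                | cons y ys => simp
              rw [if_pos hpos, pv_update_ofList, ← PySem.Set.ofList_append]
              exact ihv (out ++ x :: xs)
      exact T dis []

-- fuel irrelevance of the leaf spec
lemma pv_rb_len (rest : List (List Int)) (v : Int) :
    (PySem.List.sorted ((rest.filter (fun x => !x.contains v)).map
        (fun x => x.filter (fun m => m != -v))) (fun x => x.length) false).length ≤ rest.length := by
  have e1 := PySem.List.length_sorted
    (xs := (rest.filter (fun x => !x.contains v)).map (fun x => x.filter (fun m => m != -v)))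
    (key := fun x : List Int => x.length) (rev := false)
  have e2 : ((rest.filter (fun x => !x.contains v)).map
      (fun x => x.filter (fun m => m != -v))).length ≤ rest.length := by
    rw [List.length_map]; exact List.length_filter_le _ _
  omega

lemma pv_leaves_fuel : ∀ (f1 f2 : Nat) (branch : List (List Int)) (lits : List Int),
    branch.length ≤ f1 → branch.length ≤ f2 →
    pvLeaves f1 branch lits = pvLeaves f2 branch lits := by
  intro f1
  induction f1 with
  | zero =>
    intro f2 branch lits h1 h2
    have : branch = [] := List.length_eq_zero_iff.1 (Nat.le_zero.1 h1)
    subst this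
    cases f2 <;> rfl
  | succ n ih =>
    intro f2 branch lits h1 h2
    cases branch with
    | nil => cases f2 <;> rfl
    | cons first rest =>
      cases f2 with
      | zero => simp at h2
      | succ m =>
        show first.foldl _ [] = first.foldl _ []
        apply List.foldl_ext
        intro out v _
        by_cases h : lits.contains (-v) = true
        · rw [if_pos h, if_pos h]
        · rw [if_neg h, if_neg h]
          show out ++ pvLeaves n _ _ = out ++ pvLeaves m _ _
          have hn := pv_rb_len rest v
          simp at h1 h2
          rw [ih m _ _ (by omega) (by omega)]

-- correctness of the stack loop
lemma pv_nu_pos (cs : List (List Int)) : 0 < pvNu cs := by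
  unfold pvNu
  apply List.prod_pos
  intro x hx
  obtain ⟨c, _, rfl⟩ := List.mem_map.1 hx
  omega

lemma pv_nu_cons (c : List Int) (t : List (List Int)) :
    pvNu (c :: t) = (c.length + 1) * pvNu t := by
  simp [pvNu]

lemma pv_nu_sorted (xs : List (List Int)) :
    pvNu (PySem.List.sorted xs (fun x => x.length) false) = pvNu xs := by
  unfold pvNu
  exact List.Perm.prod_eq ((PySem.List.sorted_perm _ _ _).map _)

lemma pv_nu_strip_le (v : Int) (cs : List (List Int)) :
    pvNu ((cs.filter (fun x => !x.contains v)).map (fun x => x.filter (fun m => m != -v)))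
      ≤ pvNu cs := by
  induction cs with
  | nil => simp [pvNu]
  | cons c t ih =>
    rw [List.filter_cons]
    by_cases h : (!c.contains v) = true
    · rw [if_pos h, List.map_cons, pv_nu_cons, pv_nu_cons]
      exact Nat.mul_le_mul (by have := List.length_filter_le (fun m => m != -v) c; omega) ih
    · rw [if_neg h, pv_nu_cons]
      calc pvNu ((t.filter (fun x => !x.contains v)).map (fun x => x.filter (fun m => m != -v)))
          ≤ pvNu t := ih
        _ ≤ (c.length + 1) * pvNu t := Nat.le_mul_of_pos_left _ (by omega)

lemma pv_nu_rb_le (v : Int) (restc : List (List Int)) :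
    pvNu (PySem.List.sorted ((restc.filter (fun x => !x.contains v)).map
        (fun x => x.filter (fun m => m != -v))) (fun x => x.length) false) ≤ pvNu restc := by
  rw [pv_nu_sorted]
  exact pv_nu_strip_le v restc

lemma pv_revfold (c : Int → Bool) (item : Int → (List (List Int) × List Int)) :
    ∀ (vs : List Int) (rest : List (List (List Int) × List Int)),
    (vs.reverse).foldl (fun st v => if c v then st else item v :: st) rest
      = (vs.foldr (fun v acc => if c v then acc else item v :: acc) []) ++ rest := by
  intro vs
  induction vs with
  | nil => intro rest; simp
  | cons v t ih =>
    intro rest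
    rw [List.reverse_cons, List.foldl_append, ih, List.foldr_cons]
    simp only [List.foldl_cons, List.foldl_nil]
    by_cases h : c v = true
    · rw [if_pos h, if_pos h]
    · rw [if_neg h, if_neg h]
      simp

lemma pv_children_sum (lits : List Int) (restc : List (List Int)) :
    ∀ vs : List Int,
    ((vs.foldr (fun v acc =>
        if lits.contains (-v) then acc
        else (PySem.List.sorted ((restc.filter (fun x => !x.contains v)).map
                (fun x => x.filter (fun m => m != -v))) (fun x => x.length) false,
              if lits.contains v then lits else lits ++ [v]) :: acc) []).map
      (fun it => pvNu it.1)).sum ≤ vs.length * pvNu restc := by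
  intro vs
  induction vs with
  | nil => simp
  | cons v t ih =>
    rw [List.foldr_cons, List.length_cons, Nat.succ_mul]
    by_cases h : lits.contains (-v) = true
    · rw [if_pos h]
      omega
    · rw [if_neg h, List.map_cons, List.sum_cons]
      dsimp only
      have h1 := pv_nu_rb_le v restc
      omega

lemma pv_flatten_children (lits : List Int) (restc : List (List Int)) :
    ∀ (vs : List Int) (out : List (List Int)),
    out ++ ((vs.foldr (fun v acc =>
        if lits.contains (-v) then acc
        else (PySem.List.sorted ((restc.filter (fun x => !x.contains v)).map
                (fun x => x.filter (fun m => m != -v))) (fun x => x.length) false,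
              if lits.contains v then lits else lits ++ [v]) :: acc) []).map
        (fun it => pvLeaves it.1.length it.1 it.2)).flatten
      = vs.foldl (fun out v =>
          if lits.contains (-v) then out
          else out ++ pvLeaves restc.length
            (PySem.List.sorted ((restc.filter (fun x => !x.contains v)).map
              (fun x => x.filter (fun m => m != -v))) (fun x => x.length) false)
            (if lits.contains v then lits else lits ++ [v])) out := by
  intro vs
  induction vs with
  | nil => intro out; simp
  | cons v t iht =>
    intro out
    rw [List.foldr_cons, List.foldl_cons]
    by_cases h : lits.contains (-v) = true
    · rw [if_pos h, if_pos h]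
      exact iht out
    · rw [if_neg h, if_neg h, List.map_cons, List.flatten_cons]
      have hf := pv_leaves_fuel
        (PySem.List.sorted ((restc.filter (fun x => !x.contains v)).map
          (fun x => x.filter (fun m => m != -v))) (fun x => x.length) false).length
        restc.length
        (PySem.List.sorted ((restc.filter (fun x => !x.contains v)).map
          (fun x => x.filter (fun m => m != -v))) (fun x => x.length) false)
        (if lits.contains v then lits else lits ++ [v])
        (le_refl _) (pv_rb_len restc v)
      rw [hf, ← List.append_assoc]
      exact iht _

lemma pv_run_eq : ∀ (fuel : Nat) (stack : List (List (List Int) × List Int)) (leaves : List (List Int)),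
    (stack.map (fun it => pvNu it.1)).sum ≤ fuel →
    pvRunB fuel stack leaves
      = leaves ++ (stack.map (fun it => pvLeaves it.1.length it.1 it.2)).flatten := by
  intro fuel
  induction fuel with
  | zero =>
    intro stack leaves h
    cases stack with
    | nil => simp [pvRunB]
    | cons it rest =>
      exfalso
      have := pv_nu_pos it.1
      simp [List.sum_cons] at h
      omega
  | succ n ih =>
    intro stack leaves h
    cases stack with
    | nil => simp [pvRunB]
    | cons it rest =>
      obtain ⟨clauses, lits⟩ := it
      cases clauses with
      | nil =>
        have hs : ((rest.map (fun it => pvNu it.1)).sum) ≤ n := by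
          rw [List.map_cons, List.sum_cons] at h
          have hone : pvNu ((([] : List (List Int)), lits)).1 = 1 := rfl
          rw [hone] at h
          omega
        show pvRunB n rest (leaves ++ [PySem.List.sorted lits (fun l => l.natAbs) false]) = _
        rw [ih rest _ hs]
        simp [pvLeaves]
      | cons first restc =>
        have e1 : pvRunB (n + 1) ((first :: restc, lits) :: rest) leaves
            = pvRunB n ((first.foldr (fun v acc =>
                if lits.contains (-v) then acc
                else (PySem.List.sorted ((restc.filter (fun x => !x.contains v)).map
                        (fun x => x.filter (fun m => m != -v))) (fun x => x.length) false,
                      if lits.contains v then lits else lits ++ [v]) :: acc) []) ++ rest) leaves := by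
          show pvRunB n ((first.reverse).foldl (fun st v =>
              if lits.contains (-v) then st
              else (PySem.List.sorted ((restc.filter (fun x => !x.contains v)).map
                      (fun x => x.filter (fun m => m != -v))) (fun x => x.length) false,
                    if lits.contains v then lits else lits ++ [v]) :: st) rest) leaves = _
          rw [pv_revfold]
        have hsum : (((first.foldr (fun v acc =>
                if lits.contains (-v) then acc
                else (PySem.List.sorted ((restc.filter (fun x => !x.contains v)).map
                        (fun x => x.filter (fun m => m != -v))) (fun x => x.length) false,
                      if lits.contains v then lits else lits ++ [v]) :: acc) []) ++ rest).map
              (fun it => pvNu it.1)).sum ≤ n := by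
          have h1 := pv_children_sum lits restc first
          rw [List.map_cons, List.sum_cons, pv_nu_cons, Nat.succ_mul] at h
          have h3 := pv_nu_pos restc
          rw [List.map_append, List.sum_append]
          omega
        rw [e1, ih _ _ hsum]
        have e2 : ((first.foldr (fun v acc =>
                if lits.contains (-v) then acc
                else (PySem.List.sorted ((restc.filter (fun x => !x.contains v)).map
                        (fun x => x.filter (fun m => m != -v))) (fun x => x.length) false,
                      if lits.contains v then lits else lits ++ [v]) :: acc) []).map
              (fun it => pvLeaves it.1.length it.1 it.2)).flatten
            = pvLeaves (restc.length + 1) (first :: restc) lits := by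
          have h0 := pv_flatten_children lits restc first []
          rw [List.nil_append] at h0
          rw [h0]
          rfl
        rw [List.map_append, List.flatten_append, e2]
        simp

-- every leaf is duplicate-free
lemma pv_nodup_leaves : ∀ (fuel : Nat) (branch : List (List Int)) (lits : List Int),
    lits.Nodup → ∀ t ∈ pvLeaves fuel branch lits, t.Nodup := by
  intro fuel
  induction fuel with
  | zero =>
    intro branch lits hl t ht
    cases branch with
    | nil =>
      simp only [pvLeaves, List.mem_singleton] at ht
      subst ht
      exact (PySem.List.sorted_perm _ _ _).nodup_iff.2 hl
    | cons a b => simp [pvLeaves] at ht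
  | succ n ih =>
    intro branch lits hl t ht
    cases branch with
    | nil =>
      simp only [pvLeaves, List.mem_singleton] at ht
      subst ht
      exact (PySem.List.sorted_perm _ _ _).nodup_iff.2 hl
    | cons first rest =>
      have T : ∀ (vs : List Int) (out : List (List Int)), (∀ x ∈ out, x.Nodup) →
          ∀ t ∈ vs.foldl (fun out v =>
            if lits.contains (-v) then out
            else
              let nl := if lits.contains v then lits else lits ++ [v]
              let rb := PySem.List.sorted ((rest.filter (fun x => !x.contains v)).map
                          (fun x => x.filter (fun m => m != -v))) (fun x => x.length) false
              out ++ pvLeaves n rb nl) out, t.Nodup := by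
        intro vs
        induction vs with
        | nil => intro out hout t ht; exact hout t ht
        | cons v vs ihv =>
          intro out hout t ht
          rw [List.foldl_cons] at ht
          by_cases h : lits.contains (-v) = true
          · rw [if_pos h] at ht
            exact ihv out hout t ht
          · rw [if_neg h] at ht
            refine ihv _ ?_ t ht
            intro x hx
            rcases List.mem_append.1 hx with hx | hx
            · exact hout x hx
            · refine ih _ _ ?_ x hx
              by_cases h2 : lits.contains v = true
              · rw [if_pos h2]; exact hl
              · rw [if_neg h2]
                have hv : v ∉ lits := by simpa using h2
                simp [List.nodup_append, hl]
                intro a ha hav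
                exact hv (hav ▸ ha)
      exact T first [] (by simp) t ht

-- on duplicate-free tuples, Python's set(a) < set(b) is the length-flavoured strict subset
lemma pv_setLt_eq {a b : List Int} (ha : a.Nodup) (hb : b.Nodup) :
    pvSetLt a b = pvSmallerSubset a b := by
  unfold pvSetLt pvSmallerSubset
  rw [PySem.Set.ofList_eq_self_of_nodup a ha, PySem.Set.ofList_eq_self_of_nodup b hb]
  apply Bool.eq_iff_iff.2
  simp only [Bool.and_eq_true, Bool.not_eq_true', decide_eq_true_eq, List.all_eq_true,
    List.contains_eq_mem, decide_eq_true_eq]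
  constructor
  · rintro ⟨hsub, hne⟩
    have hsub' : ∀ x ∈ a, x ∈ b := (PySem.Set.issubset_iff _ _).1 hsub
    have hnot : ¬ (∀ x, x ∈ a ↔ x ∈ b) := by
      intro hiff
      exact absurd ((PySem.Set.equal_iff _ _).2 hiff) (by simp [hne])
    have hfsub : a.toFinset ⊆ b.toFinset := by
      intro x hx
      simp only [List.mem_toFinset] at hx ⊢
      exact hsub' x hx
    have hslt : a.toFinset ⊂ b.toFinset := by
      refine ⟨hfsub, fun hrev => hnot fun x => ?_⟩
      constructor
      · intro hx; simpa using hfsub (by simpa using hx)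
      · intro hx; simpa using hrev (by simpa using hx)
    have := Finset.card_lt_card hslt
    rw [List.toFinset_card_of_nodup ha, List.toFinset_card_of_nodup hb] at this
    exact ⟨this, hsub'⟩
  · rintro ⟨hlt, hsub'⟩
    refine ⟨(PySem.Set.issubset_iff _ _).2 hsub', ?_⟩
    rw [Bool.eq_false_iff]
    intro heq
    have hiff := (PySem.Set.equal_iff _ _).1 heq
    have : a.toFinset = b.toFinset := by
      ext x; simp only [List.mem_toFinset]; exact hiff x
    have := congrArg Finset.card this
    rw [List.toFinset_card_of_nodup ha, List.toFinset_card_of_nodup hb] at this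
    omega

-- the incremental acceptance pass computes the global subsumption filter
lemma pv_accept : ∀ (t acc : List (List Int)),
    t.Pairwise (fun a b => a.length ≤ b.length) →
    (∀ b c, acc.any (fun x => pvSmallerSubset x b) = true → pvSmallerSubset b c = true →
      acc.any (fun x => pvSmallerSubset x c) = true) →
    t.foldl (fun acc b => if acc.any (fun a => pvSmallerSubset a b) then acc else acc ++ [b]) acc
      = acc ++ t.filter (fun bb =>
          !(acc.any (fun aa => pvSmallerSubset aa bb) || t.any (fun aa => pvSmallerSubset aa bb))) := by
  intro t
  induction t with
  | nil => intro acc _ _; simp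
  | cons b t iht =>
    intro acc hp hcl
    rw [List.pairwise_cons] at hp
    obtain ⟨hrel, hp'⟩ := hp
    rw [List.foldl_cons]
    by_cases hc : acc.any (fun a => pvSmallerSubset a b) = true
    · rw [if_pos hc, iht acc hp' hcl]
      congr 1
      rw [List.filter_cons]
      have hdrop : (!(acc.any (fun aa => pvSmallerSubset aa b)
          || (b :: t).any (fun aa => pvSmallerSubset aa b))) = false := by
        simp [hc]
      rw [if_neg (by rw [hdrop]; simp)]
      apply List.filter_congr
      intro bb hbb
      simp only [List.any_cons]
      by_cases hbbb : pvSmallerSubset b bb = true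
      · have := hcl b bb hc hbbb
        simp [this, hbbb]
      · simp [Bool.eq_false_iff.2 hbbb]
    · have hc' : acc.any (fun a => pvSmallerSubset a b) = false := Bool.eq_false_iff.2 hc
      rw [if_neg hc, iht (acc ++ [b]) hp' ?_]
      · have hkeep : (!(acc.any (fun aa => pvSmallerSubset aa b)
            || (b :: t).any (fun aa => pvSmallerSubset aa b))) = true := by
          have hself : pvSmallerSubset b b = false := pv_ss_false_of_le (Nat.le_refl _)
          have ht' : t.any (fun aa => pvSmallerSubset aa b) = false := by
            rw [List.any_eq_false]
            intro x hx
            simp [pv_ss_false_of_le (hrel x hx)]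
          simp [hc', hself, ht']
        rw [List.filter_cons, if_pos hkeep]
        rw [List.append_assoc, List.singleton_append]
        congr 2
        apply List.filter_congr
        intro bb hbb
        simp only [List.any_append, List.any_cons, List.any_nil, Bool.or_false, Bool.or_assoc]
      · intro x c hx hxc
        simp only [List.any_append, List.any_cons, List.any_nil, Bool.or_eq_true,
          Bool.or_false] at hx ⊢
        rcases hx with hx | hx
        · exact Or.inl (hcl x c hx hxc)
        · exact Or.inr (pv_ss_trans hx hxc)

-- swapping the test inside the fold on duplicate-free elements
lemma pv_fold_swap : ∀ (t acc : List (List Int)), (∀ x ∈ t, x.Nodup) → (∀ x ∈ acc, x.Nodup) →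
    t.foldl (fun acc b => if acc.any (fun a => pvSetLt a b) then acc else acc ++ [b]) acc
      = t.foldl (fun acc b => if acc.any (fun a => pvSmallerSubset a b) then acc else acc ++ [b]) acc := by
  intro t
  induction t with
  | nil => intro acc _ _; rfl
  | cons b t iht =>
    intro acc htn hacc
    rw [List.foldl_cons, List.foldl_cons]
    have hb : b.Nodup := htn b (by simp)
    have hany : acc.any (fun a => pvSetLt a b) = acc.any (fun a => pvSmallerSubset a b) := by
      induction acc with
      | nil => rfl
      | cons x xs ihx =>
        simp only [List.any_cons]
        rw [pv_setLt_eq (hacc x (by simp)) hb, ihx (fun y hy => hacc y (by simp [hy]))]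
    rw [hany]
    by_cases hc : acc.any (fun a => pvSmallerSubset a b) = true
    · rw [if_pos hc]
      exact iht acc (fun x hx => htn x (by simp [hx])) hacc
    · rw [if_neg hc]
      refine iht (acc ++ [b]) (fun x hx => htn x (by simp [hx])) ?_
      intro x hx
      rcases List.mem_append.1 hx with hx | hx
      · exact hacc x hx
      · simp at hx; subst hx; exact hb

-- ===== VERDICT (by name: the statement is the Claim_ definition above) =====
theorem CNFt_open_branches_spec : Claim_equal_CNFt_open_branches := by
  intro f _dom
  unfold Spec_CNFt_open_branches CNFt_open_branches CNFt_open_branches_alt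
  have hrun : pvRunB (pvNu f) [(f, [])] [] = pvLeaves f.length f [] := by
    have h0 := pv_run_eq (pvNu f) [(f, [])] [] (by simp)
    simpa using h0
  rw [hrun, pv_atree_eq f.length f [] (Nat.le_refl _)]
  simp only [PySem.List.dedup_eq_ofList]
  set L := pvLeaves f.length f [] with hLdef
  set U := PySem.Set.ofList L with hU
  set s := PySem.List.sorted U (fun l => l.length) false with hs
  have hsnd : ∀ x ∈ s, x.Nodup := by
    intro x hx
    have hx1 : x ∈ U := (PySem.List.mem_sorted _ _ _ _).1 hx
    have hx2 : x ∈ L := (PySem.Set.mem_ofList _ _).1 hx1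
    exact pv_nodup_leaves f.length f [] (by simp) x hx2
  have hswap := pv_fold_swap s [] hsnd (by simp)
  have haccept := pv_accept s [] (PySem.List.sorted_pairwise U (fun l => l.length)) (by simp)
  simp only [List.any_nil, Bool.false_or, List.nil_append] at haccept
  rw [hswap, haccept]
  by_cases hlen : U.length < 2
  · rw [if_pos hlen]
    interval_cases hU2 : U.length
    · have hUnil : U = [] := List.length_eq_zero_iff.1 hU2
      have hsnil : s = [] := by rw [hs, hUnil]; rfl
      rw [hUnil, hsnil]
      rfl
    · obtain ⟨x, hx⟩ := List.length_eq_one_iff.1 hU2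
      have hsx : s = [x] := by
        rw [hs, hx]
        exact PySem.List.sorted_eq_self_of_pairwise _ _ (by simp)
      have hxx : pvSmallerSubset x x = false := pv_ss_false_of_le (Nat.le_refl _)
      have hflt : List.filter (fun bb => !s.any fun aa => pvSmallerSubset aa bb) s = [x] := by
        rw [hsx]; simp [hxx]
      rw [hflt, hx]
      rfl
  · rw [if_neg hlen,
      pv_sweep s.length s (Nat.le_refl _) (PySem.List.sorted_pairwise U (fun l => l.length))]
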